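-- pv_equiv track=rewrite | github.com/sanjaybommalene/practiceproblems | Arrays.py | min_total_range
-- ===== SOURCE A (Python) =====
-- def min_total_range(arr, k):
--     if k == 1:
--         return arr[-1] - arr[0]
--     if k >= len(arr):
--         return 0
--
--     # Calculate differences between consecutive elements
--     gaps = []
--     for i in range(1, len(arr)):
--         gaps.append(arr[i] - arr[i-1])
--
--     # Sort the differences in descending order
--     gaps.sort(reverse=True)
--
--     # The sum is (total range) - (sum of k-1 largest gaps)
--     total_range = arr[-1] - arr[0]
--     sum_of_gaps = sum(gaps[:k-1])
--
--     return total_range - sum_of_gaps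
-- ===== SOURCE B (Python) =====
-- def min_total_range(arr, k):
--     # Answer = sum of the (n-k) smallest consecutive gaps; selected by
--     # recursive 3-way partitioning around a pivot instead of a full sort.
--     n = len(arr)
--     if k == 1:
--         return arr[-1] - arr[0]
--     if k >= n:
--         return 0
--     gaps = [b - a for a, b in zip(arr, arr[1:])]
--     return _sum_smallest(gaps, n - k)
--
--
-- def _sum_smallest(xs, t):
--     # Sum of the t smallest elements of xs (quickselect-style partition).
--     if t <= 0:
--         return 0
--     if t >= len(xs):
--         return sum(xs)
--     p = xs[len(xs) // 2]
--     lo = [x for x in xs if x < p]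
--     hi = [x for x in xs if x > p]
--     ne = len(xs) - len(lo) - len(hi)
--     if t <= len(lo):
--         return _sum_smallest(lo, t)
--     if t <= len(lo) + ne:
--         return sum(lo) + p * (t - len(lo))
--     return sum(lo) + p * ne + _sum_smallest(hi, t - len(lo) - ne)
-- ===== Notes on version B (the rewrite author's own statement) =====
-- stated objective: alternative
-- what changed: Instead of fully sorting the gaps descending and subtracting the k-1 largest from the total range, B builds the gaps by zipping consecutive pairs and sums the n-k smallest gaps directly with a recursive quickselect-style 3-way partition (no sort).
-- outside the precondition, e.g. on min_total_range([1, 5, 10], 0): A returns 4, B returns 9; on min_total_range([], 1): A raises IndexError, B raises IndexError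
import Mathlib
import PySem

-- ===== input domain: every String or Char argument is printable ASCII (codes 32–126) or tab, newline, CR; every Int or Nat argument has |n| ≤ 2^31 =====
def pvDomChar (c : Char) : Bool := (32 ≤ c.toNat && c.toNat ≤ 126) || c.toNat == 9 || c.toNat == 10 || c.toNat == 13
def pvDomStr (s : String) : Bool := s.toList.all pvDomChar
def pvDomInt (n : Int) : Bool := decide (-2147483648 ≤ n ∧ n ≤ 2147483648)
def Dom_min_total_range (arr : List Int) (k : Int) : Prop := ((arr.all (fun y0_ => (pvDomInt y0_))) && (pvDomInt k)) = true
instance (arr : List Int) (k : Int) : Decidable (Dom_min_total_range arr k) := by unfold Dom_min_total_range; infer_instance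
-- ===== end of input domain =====

-- B replaces the descending sort + "total range minus k-1 largest gaps" computation by a
-- direct quickselect-style 3-way-partition sum of the n-k smallest consecutive gaps (alternative algorithm, not measured faster).


-- ===== PORT A =====
def min_total_range (arr : List Int) (k : Int) : Int :=
  if k = 1 then PySem.List.pyGetD arr (-1) 0 - PySem.List.pyGetD arr 0 0
  else if k ≥ PySem.List.len arr then 0
  else
    -- gaps built by the index loop 'for i in range(1, len(arr)): gaps.append(arr[i]-arr[i-1])'
    let gaps := (PySem.List.pyRange 1 (PySem.List.len arr) 1).foldl
      (fun acc i => acc ++ [PySem.List.pyGetD arr i 0 - PySem.List.pyGetD arr (i - 1) 0]) []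
    let gapsSorted := PySem.List.sorted gaps (fun x => x) true
    let totalRange := PySem.List.pyGetD arr (-1) 0 - PySem.List.pyGetD arr 0 0
    let sumOfGaps := (PySem.List.slice gapsSorted none (some (k - 1))).sum
    totalRange - sumOfGaps

-- ===== PORT B =====
-- sum of the t smallest elements of xs, by 3-way partition around the middle element
def sumSmallest (xs : List Int) (t : Int) : Int :=
  if t ≤ 0 then 0
  else if (xs.length : Int) ≤ t then xs.sum
  else
    let p := xs.getD (xs.length / 2) 0
    let lo := xs.filter (fun x => x < p)
    let hi := xs.filter (fun x => p < x)
    let ne : Int := (xs.length : Int) - lo.length - hi.length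
    if t ≤ (lo.length : Int) then sumSmallest lo t
    else if t ≤ (lo.length : Int) + ne then lo.sum + p * (t - lo.length)
    else lo.sum + p * ne + sumSmallest hi (t - lo.length - ne)
termination_by xs.length
decreasing_by
  all_goals
    simp only [List.length_unattach]
    have hx : xs ≠ [] := by rintro rfl; simp_all; omega
    have hlt : xs.length / 2 < xs.length :=
      Nat.div_lt_self (List.length_pos_of_ne_nil hx) (by omega)
    have hmem : xs.getD (xs.length / 2) 0 ∈ xs := by
      rw [List.getD_eq_getElem xs 0 hlt]; exact List.getElem_mem hlt
    refine lt_of_lt_of_eq ?_ (List.length_attach (l := xs))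
    refine List.length_filter_lt_length_iff_exists.2
      ⟨⟨xs.getD (xs.length / 2) 0, hmem⟩, List.mem_attach _ _, ?_⟩
    simp

def min_total_range_alt (arr : List Int) (k : Int) : Int :=
  if k = 1 then PySem.List.pyGetD arr (-1) 0 - PySem.List.pyGetD arr 0 0
  else if k ≥ PySem.List.len arr then 0
  else
    let gaps := (arr.zip arr.tail).map (fun p => p.2 - p.1)
    sumSmallest gaps (PySem.List.len arr - k)

-- ===== PRECONDITION & SPEC =====
-- Pre_ restricts to the natural domain k ≥ 1 (at least one group): for k ≤ 0 A's value is a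
-- negative-slice wraparound artefact, and on arr = [] with k = 1 A raises IndexError.
def Pre_min_total_range (arr : List Int) (k : Int) : Prop := 1 ≤ k ∧ (k = 1 → arr ≠ [])
instance (arr : List Int) (k : Int) : Decidable (Pre_min_total_range arr k) := by
  unfold Pre_min_total_range; infer_instance

def pvWitness_min_total_range : List Int × Int := ([1, 3, 9, 10], 2)

def Spec_min_total_range (arr : List Int) (k : Int) (out : Int) : Prop := out = min_total_range_alt arr k
instance (arr : List Int) (k : Int) (out : Int) : Decidable (Spec_min_total_range arr k out) := by unfold Spec_min_total_range; infer_instance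

-- ===== CLAIM (what is proved, stated in full; the proofs are below) =====
def Claim_equal_min_total_range : Prop := ∀ (arr : List Int) (k : Int), Dom_min_total_range arr k → Pre_min_total_range arr k → Spec_min_total_range arr k (min_total_range arr k)

-- ===== LEMMAS AND PROOFS =====

theorem perm3 (xs : List Int) (p : Int) :
    (xs.filter (fun x => x < p) ++ (xs.filter (fun x => x = p) ++ xs.filter (fun x => p < x))).Perm xs := by
  have h1 := List.filter_append_perm (fun x => decide (x < p)) xs
  have h2 := List.filter_append_perm (fun x => decide (x = p)) (xs.filter (fun x => !decide (x < p)))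
  rw [List.filter_filter, List.filter_filter] at h2
  have e1 : xs.filter (fun x => decide (x = p) && !decide (x < p)) = xs.filter (fun x => x = p) := by
    refine List.filter_congr ?_
    intro x _
    rcases lt_trichotomy x p with h | h | h <;> simp_all <;> omega
  have e2 : xs.filter (fun x => !decide (x = p) && !decide (x < p)) = xs.filter (fun x => p < x) := by
    refine List.filter_congr ?_
    intro x _
    rcases lt_trichotomy x p with h | h | h <;> simp_all <;> omega
  rw [e1, e2] at h2
  exact (List.Perm.append_left _ h2).trans h1

theorem mid_eq_replicate (xs : List Int) (p : Int) :
    xs.filter (fun x => x = p) = List.replicate (xs.filter (fun x => x = p)).length p := by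
  refine List.eq_replicate_iff.2 ⟨rfl, ?_⟩
  intro b hb
  exact of_decide_eq_true (List.mem_filter.1 hb).2

theorem sorted_partition (xs : List Int) (p : Int) :
    PySem.List.sorted xs (fun x => x) false =
      PySem.List.sorted (xs.filter (fun x => x < p)) (fun x => x) false
      ++ (xs.filter (fun x => x = p)
      ++ PySem.List.sorted (xs.filter (fun x => p < x)) (fun x => x) false) := by
  refine PySem.List.sorted_id_eq_of_perm_of_pairwise _ _ ?_ ?_
  · exact ((PySem.List.sorted_perm _ _ _).append
      ((List.Perm.refl _).append (PySem.List.sorted_perm _ _ _))).trans (perm3 xs p)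
  · rw [List.pairwise_append, List.pairwise_append]
    refine ⟨PySem.List.sorted_pairwise _ _, ⟨?_, PySem.List.sorted_pairwise _ _, ?_⟩, ?_⟩
    · rw [mid_eq_replicate xs p]
      exact List.pairwise_replicate.2 (Or.inr le_rfl)
    · intro a ha b hb
      have ha' : a = p := of_decide_eq_true (List.mem_filter.1 ha).2
      have hb' : p < b := of_decide_eq_true (List.mem_filter.1 ((PySem.List.mem_sorted _ _ _ _).1 hb)).2
      omega
    · intro a ha b hb
      have ha' : a < p := of_decide_eq_true (List.mem_filter.1 ((PySem.List.mem_sorted _ _ _ _).1 ha)).2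
      rcases List.mem_append.1 hb with hb | hb
      · have : b = p := of_decide_eq_true (List.mem_filter.1 hb).2
        omega
      · have : p < b := of_decide_eq_true (List.mem_filter.1 ((PySem.List.mem_sorted _ _ _ _).1 hb)).2
        omega

theorem sumSmallest_eq (xs : List Int) (t : Int) :
    sumSmallest xs t = ((PySem.List.sorted xs (fun x => x) false).take t.toNat).sum := by
  fun_induction sumSmallest xs t with
  | case1 xs t h =>
      simp [Int.toNat_of_nonpos h]
  | case2 xs t h1 h2 =>
      rw [List.take_of_length_le (by
        rw [PySem.List.length_sorted]
        omega)]
      exact ((PySem.List.sorted_perm _ _ _).sum_eq).symm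
  | case3 xs t h1 h2 p lo ht ih =>
      simp only [lo, List.unattach_filter, List.unattach_attach] at ht ih
      show (if t ≤ ((xs.filter (fun x => decide (x < p))).length : Int) then
              sumSmallest (xs.filter (fun x => decide (x < p))) t
            else if t ≤ ((xs.filter (fun x => decide (x < p))).length : Int) +
                ((xs.length : Int) - (xs.filter (fun x => decide (x < p))).length - (xs.filter (fun x => decide (p < x))).length) then
              (xs.filter (fun x => decide (x < p))).sum + p * (t - (xs.filter (fun x => decide (x < p))).length)
            else (xs.filter (fun x => decide (x < p))).sum + p * ((xs.length : Int) - (xs.filter (fun x => decide (x < p))).length - (xs.filter (fun x => decide (p < x))).length) + sumSmallest (xs.filter (fun x => decide (p < x))) (t - (xs.filter (fun x => decide (x < p))).length - ((xs.length : Int) - (xs.filter (fun x => decide (x < p))).length - (xs.filter (fun x => decide (p < x))).length))) =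
          (List.take t.toNat (PySem.List.sorted xs fun x => x)).sum
      rw [if_pos ht]
      rw [ih, sorted_partition xs p,
        List.take_append_of_le_length (by rw [PySem.List.length_sorted]; omega)]
  | case4 xs t h1 h2 p lo hi ne h3 h4 =>
      simp only [lo, hi, ne, List.unattach_filter, List.unattach_attach] at h3 h4
      show (if t ≤ ((xs.filter (fun x => decide (x < p))).length : Int) then
              sumSmallest (xs.filter (fun x => decide (x < p))) t
            else if t ≤ ((xs.filter (fun x => decide (x < p))).length : Int) +
                ((xs.length : Int) - (xs.filter (fun x => decide (x < p))).length - (xs.filter (fun x => decide (p < x))).length) then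
              (xs.filter (fun x => decide (x < p))).sum + p * (t - (xs.filter (fun x => decide (x < p))).length)
            else (xs.filter (fun x => decide (x < p))).sum + p * ((xs.length : Int) - (xs.filter (fun x => decide (x < p))).length - (xs.filter (fun x => decide (p < x))).length) + sumSmallest (xs.filter (fun x => decide (p < x))) (t - (xs.filter (fun x => decide (x < p))).length - ((xs.length : Int) - (xs.filter (fun x => decide (x < p))).length - (xs.filter (fun x => decide (p < x))).length))) =
          (List.take t.toNat (PySem.List.sorted xs fun x => x)).sum
      rw [if_neg h3, if_pos h4]
      have hlen := (perm3 xs p).length_eq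
      simp only [List.length_append] at hlen
      rw [sorted_partition xs p, List.take_append, List.take_append,
        List.take_of_length_le (l := PySem.List.sorted (xs.filter (fun x => decide (x < p))) (fun x => x) false)
          (by rw [PySem.List.length_sorted]; omega),
        mid_eq_replicate xs p, List.take_replicate]
      have hmin : min (t.toNat - (PySem.List.sorted (xs.filter (fun x => decide (x < p))) (fun x => x) false).length)
          (xs.filter (fun x => decide (x = p))).length
          = t.toNat - (xs.filter (fun x => decide (x < p))).length := by
        simp only [PySem.List.length_sorted]
        omega
      rw [hmin]
      have hzero : t.toNat - (PySem.List.sorted (xs.filter (fun x => decide (x < p))) (fun x => x) false).length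
          - (List.replicate (xs.filter (fun x => decide (x = p))).length p).length = 0 := by
        simp only [PySem.List.length_sorted, List.length_replicate]
        omega
      rw [hzero, List.take_zero, List.sum_append, List.sum_append, List.sum_nil,
        List.sum_replicate, (PySem.List.sorted_perm _ _ _).sum_eq, nsmul_eq_mul]
      have : ((t.toNat - (xs.filter (fun x => decide (x < p))).length : Nat) : Int)
          = t - (xs.filter (fun x => decide (x < p))).length := by omega
      rw [add_zero, this]
      ring
  | case5 xs t h1 h2 p lo hi ne h3 h4 ih =>
      simp only [lo, hi, ne, List.unattach_filter, List.unattach_attach] at h3 h4 ih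
      show (if t ≤ ((xs.filter (fun x => decide (x < p))).length : Int) then
              sumSmallest (xs.filter (fun x => decide (x < p))) t
            else if t ≤ ((xs.filter (fun x => decide (x < p))).length : Int) +
                ((xs.length : Int) - (xs.filter (fun x => decide (x < p))).length - (xs.filter (fun x => decide (p < x))).length) then
              (xs.filter (fun x => decide (x < p))).sum + p * (t - (xs.filter (fun x => decide (x < p))).length)
            else (xs.filter (fun x => decide (x < p))).sum + p * ((xs.length : Int) - (xs.filter (fun x => decide (x < p))).length - (xs.filter (fun x => decide (p < x))).length) + sumSmallest (xs.filter (fun x => decide (p < x))) (t - (xs.filter (fun x => decide (x < p))).length - ((xs.length : Int) - (xs.filter (fun x => decide (x < p))).length - (xs.filter (fun x => decide (p < x))).length))) =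
          (List.take t.toNat (PySem.List.sorted xs fun x => x)).sum
      rw [if_neg h3, if_neg h4]
      have hlen := (perm3 xs p).length_eq
      simp only [List.length_append] at hlen
      rw [ih, sorted_partition xs p, List.take_append, List.take_append,
        List.take_of_length_le (l := PySem.List.sorted (xs.filter (fun x => decide (x < p))) (fun x => x) false)
          (by rw [PySem.List.length_sorted]; omega),
        List.take_of_length_le (l := xs.filter (fun x => decide (x = p))) (by simp only [PySem.List.length_sorted]; omega)]
      rw [List.sum_append, List.sum_append, (PySem.List.sorted_perm _ _ _).sum_eq]
      have hmid : (xs.filter (fun x => decide (x = p))).sum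
          = ((xs.filter (fun x => decide (x = p))).length : Int) * p := by
        rw [mid_eq_replicate xs p]
        simp [List.sum_replicate]
      have harg : (t - ((xs.filter (fun x => decide (x < p))).length : Int) -
            ((xs.length : Int) - (xs.filter (fun x => decide (x < p))).length - (xs.filter (fun x => decide (p < x))).length)).toNat
          = t.toNat - (PySem.List.sorted (xs.filter (fun x => decide (x < p))) (fun x => x) false).length
            - (xs.filter (fun x => decide (x = p))).length := by
        simp only [PySem.List.length_sorted]
        omega
      rw [harg, hmid]
      have : (((xs.filter (fun x => decide (x = p))).length : Nat) : Int)
          = (xs.length : Int) - (xs.filter (fun x => decide (x < p))).length - (xs.filter (fun x => decide (p < x))).length := by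
        omega
      rw [this]
      ring


-- A's append-loop over range(1, len(arr)) builds exactly the consecutive-gap list B builds by zipping
theorem gaps_loop_eq_zip (arr : List Int) :
    (PySem.List.pyRange 1 (PySem.List.len arr) 1).map
      (fun i => PySem.List.pyGetD arr i 0 - PySem.List.pyGetD arr (i - 1) 0)
    = (arr.zip arr.tail).map (fun p => p.2 - p.1) := by
  apply List.ext_getElem
  · simp only [List.length_map, PySem.List.len_eq, PySem.List.length_pyRange_one,
      List.length_zip, List.length_tail]
    omega
  · intro j h1 h2
    simp only [List.length_map, PySem.List.len_eq, PySem.List.length_pyRange_one,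
      List.length_zip, List.length_tail] at h1 h2
    have hb : j + 1 < arr.length := by omega
    have hj : j < arr.length := by omega
    simp only [List.getElem_map, PySem.List.getElem_pyRange_one, List.getElem_zip,
      List.getElem_tail]
    have e2 : (1 : Int) + (j : Int) - 1 = ((j : Nat) : Int) := by omega
    have e1 : (1 : Int) + (j : Int) = ((j + 1 : Nat) : Int) := by push_cast; ring
    rw [e2, e1, PySem.List.pyGetD_natCast, PySem.List.pyGetD_natCast,
      List.getD_eq_getElem arr 0 hb, List.getD_eq_getElem arr 0 hj]

-- telescoping: the consecutive gaps of a :: l sum to last - first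
theorem gaps_sum_tel (a : Int) (l : List Int) :
    ((((a :: l).zip l).map fun p => p.2 - p.1)).sum = l.getLastD a - a := by
  induction l generalizing a with
  | nil => simp
  | cons b l ih =>
      rw [show ((a :: b :: l).zip (b :: l)) = (a, b) :: ((b :: l).zip l) from rfl,
        List.map_cons, List.sum_cons, ih b, List.getLastD_cons]
      ring

-- descending sort is the reverse of the ascending sort
theorem sorted_rev_eq_reverse (xs : List Int) :
    PySem.List.sorted xs (fun x => x) true = (PySem.List.sorted xs (fun x => x) false).reverse := by
  refine List.Perm.eq_of_pairwise (le := fun a b : Int => b ≤ a)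
    (fun a b _ _ h1 h2 => by omega) (PySem.List.sorted_pairwise_rev _ _) ?_ ?_
  · rw [List.pairwise_reverse]
    exact PySem.List.sorted_pairwise _ _
  · exact (PySem.List.sorted_perm _ _ _).trans
      ((PySem.List.sorted_perm xs (fun x => x) false).symm.trans (List.reverse_perm _).symm)

-- sum of the first j elements of the reversed list
theorem sum_take_reverse (l : List Int) (j : Nat) :
    (l.reverse.take j).sum = l.sum - (l.take (l.length - j)).sum := by
  rw [List.take_reverse, List.sum_reverse]
  have := List.sum_take_add_sum_drop l (l.length - j)
  omega

-- the main (2 ≤ k < len) branch of both ports computes the same value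
theorem main_branch (a : Int) (l : List Int) (k : Int) (h2 : 2 ≤ k)
    (hkn : k < ((a :: l).length : Int)) :
    PySem.List.pyGetD (a :: l) (-1) 0 - PySem.List.pyGetD (a :: l) 0 0 -
      (PySem.List.slice
        (PySem.List.sorted
          ((PySem.List.pyRange 1 (PySem.List.len (a :: l)) 1).foldl
            (fun acc i => acc ++ [PySem.List.pyGetD (a :: l) i 0 - PySem.List.pyGetD (a :: l) (i - 1) 0]) [])
          (fun x => x) true)
        none (some (k - 1))).sum
    = sumSmallest (((a :: l).zip (a :: l).tail).map (fun p => p.2 - p.1))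
        (PySem.List.len (a :: l) - k) := by
  have hG : ((PySem.List.pyRange 1 (PySem.List.len (a :: l)) 1).foldl
      (fun acc i => acc ++ [PySem.List.pyGetD (a :: l) i 0 - PySem.List.pyGetD (a :: l) (i - 1) 0]) [])
      = ((a :: l).zip (a :: l).tail).map (fun p => p.2 - p.1) := by
    rw [PySem.List.foldl_append_singleton_eq_map]
    exact gaps_loop_eq_zip _
  rw [hG]
  simp only [List.tail_cons]
  have hm : (((a :: l).zip l).map (fun p : Int × Int => p.2 - p.1)).length = l.length := by
    simp [List.length_zip]
  have htot : PySem.List.pyGetD (a :: l) (-1) 0 - PySem.List.pyGetD (a :: l) 0 0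
      = (((a :: l).zip l).map (fun p : Int × Int => p.2 - p.1)).sum := by
    rw [PySem.List.pyGetD_neg_one (a :: l) 0 (by simp), PySem.List.pyGetD_zero_cons,
      gaps_sum_tel, List.getLast_eq_getLastD]
  rw [htot, PySem.List.slice_to _ (by omega : (0:Int) ≤ k - 1), sorted_rev_eq_reverse,
    sum_take_reverse, (PySem.List.sorted_perm _ _ _).sum_eq, sumSmallest_eq,
    PySem.List.length_sorted, hm]
  have hidx : l.length - (k - 1).toNat = (PySem.List.len (a :: l) - k).toNat := by
    rw [PySem.List.len_eq]
    simp only [List.length_cons] at hkn ⊢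
    omega
  rw [hidx]
  ring

-- ===== VERDICT (by name: the statement is the Claim_ definition above) =====
theorem min_total_range_spec : Claim_equal_min_total_range := by
  unfold Claim_equal_min_total_range Spec_min_total_range Pre_min_total_range
  intro arr k _ hpre
  obtain ⟨hk1, hk2⟩ := hpre
  unfold min_total_range min_total_range_alt
  by_cases hk : k = 1
  · rw [if_pos hk, if_pos hk]
  · rw [if_neg hk, if_neg hk]
    by_cases hge : k ≥ PySem.List.len arr
    · rw [if_pos hge, if_pos hge]
    · rw [if_neg hge, if_neg hge]
      rw [PySem.List.len_eq] at hge
      obtain ⟨a, l, rfl⟩ : ∃ a l, arr = a :: l := by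
        cases arr with
        | nil => simp at hge; omega
        | cons a l => exact ⟨a, l, rfl⟩
      exact main_branch a l k (by omega) (by omega)
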